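-- pv_equiv track=rewrite | github.com/TotskayaOV/Bot | external_database/writing.py | rewriting_data
-- ===== SOURCE A (Python) =====
-- def rewriting_data(num_agent: int, num_string: int, gsheet_value: dict):
--     if num_agent == 1 or num_agent == 4 or num_agent == 5 or num_agent == 6:
--         agent_list = gsheet_value.get('values')[0]
--         match num_agent:
--             case 1: company_name = 'Изилоджистик Мск'
--             case 4: company_name = 'Л Карго СПб'
--             case 5: company_name = 'Изилоджистик СПб'
--             case 6: company_name = 'Изилоджистик Казань'
--         if len(agent_list) < 11:
--             role = 'Универсал'
--         else:
--             role = agent_list[10]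
--         if len(agent_list) < 5:
--             count_append = 5 - len(agent_list)
--             while count_append <= 5:
--                 agent_list.append('')
--                 count_append += 1
--         data = {
--             'agent_name': agent_list[1],
--             'phone_number':  agent_list[2],
--             'inn_number': agent_list[4],
--             'role': role,
--             'company_name': company_name
--         }
--     elif num_agent == 2:
--         agent_list = gsheet_value.get('values')[0]
--         if len(agent_list) < 8 or agent_list[7] == '':
--             role = 'Универсал'
--         else:
--             role = agent_list[7]
--         if len(agent_list) < 5:
--             count_append = 5 - len(agent_list)
--             while count_append <= 5:
--                 agent_list.append('')
--                 count_append += 1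
--         data = {
--             'agent_name': agent_list[1],
--             'phone_number': agent_list[2],
--             'inn_number': agent_list[4],
--             'role': role,
--             'company_name': 'Я го'
--         }
--     elif num_agent == 3:
--         agent_list = gsheet_value.get('values')[0]
--         if len(agent_list) < 12:
--             role = 'Универсал'
--         else:
--             role = agent_list[11]
--         if len(agent_list) < 5:
--             count_append = 5 - len(agent_list)
--             while count_append <= 5:
--                 agent_list.append('')
--                 count_append += 1
--         data = {
--             'agent_name': agent_list[1],
--             'phone_number': agent_list[3],
--             'inn_number': agent_list[5],
--             'role': role,
--             'company_name': 'Л Карго Мск'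
--         }
--     return data
-- ===== SOURCE B (Python) =====
-- # B: single data-driven path (config table + total cell accessor) instead of three
-- # near-identical branches; does not mutate the input row (A pads it in place).
-- CONFIG = {
--     1: ('Изилоджистик Мск', 10, False, 2, 4),
--     2: ('Я го', 7, True, 2, 4),
--     3: ('Л Карго Мск', 11, False, 3, 5),
--     4: ('Л Карго СПб', 10, False, 2, 4),
--     5: ('Изилоджистик СПб', 10, False, 2, 4),
--     6: ('Изилоджистик Казань', 10, False, 2, 4),
-- }
--
-- def rewriting_data(num_agent: int, num_string: int, gsheet_value: dict):
--     company, role_idx, blank_means_default, phone_idx, inn_idx = CONFIG[num_agent]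
--     row = gsheet_value.get('values')[0]
--
--     def cell(i):
--         return row[i] if i < len(row) else ''
--
--     role = cell(role_idx)
--     if role_idx >= len(row) or (blank_means_default and role == ''):
--         role = 'Универсал'
--     return {
--         'agent_name': cell(1),
--         'phone_number': cell(phone_idx),
--         'inn_number': cell(inn_idx),
--         'role': role,
--         'company_name': company,
--     }
-- ===== Notes on version B (the rewrite author's own statement) =====
-- stated objective: simpler
-- what changed: Replaced the three duplicated branches, the match on company names and the in-place padding loop by one unified pass driven by a per-agent config table and a total cell accessor that yields '' past the end of the row.
import Mathlib
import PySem

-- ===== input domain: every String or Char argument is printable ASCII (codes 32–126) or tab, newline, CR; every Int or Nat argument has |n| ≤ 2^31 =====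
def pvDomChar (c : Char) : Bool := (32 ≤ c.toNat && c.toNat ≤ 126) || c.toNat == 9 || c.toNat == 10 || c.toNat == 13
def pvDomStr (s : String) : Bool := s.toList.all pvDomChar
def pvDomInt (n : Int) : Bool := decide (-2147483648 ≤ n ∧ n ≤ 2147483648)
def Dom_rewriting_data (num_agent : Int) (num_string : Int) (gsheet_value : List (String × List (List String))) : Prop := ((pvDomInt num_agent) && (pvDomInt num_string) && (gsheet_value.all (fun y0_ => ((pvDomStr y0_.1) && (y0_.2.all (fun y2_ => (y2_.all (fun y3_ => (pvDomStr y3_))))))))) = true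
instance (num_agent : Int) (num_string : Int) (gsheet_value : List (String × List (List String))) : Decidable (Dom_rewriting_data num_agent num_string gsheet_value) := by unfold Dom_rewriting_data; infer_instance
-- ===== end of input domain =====

-- B replaces A's three duplicated branches by one config-table-driven pass; B does not
-- mutate the caller's row (A pads it in place) — the equivalence is about the return value.

-- ===== PORT A =====
-- the `while count_append <= 5: agent_list.append(''); count_append += 1` loop, verbatim
def padWhileA (count : Int) (l : List String) : List String :=
  if _h : count ≤ 5 then padWhileA (count + 1) (l ++ [""]) else l
  termination_by (6 - count).toNat
  decreasing_by omega

-- one branch body of A: role threshold/index, optional blank-check (agent 2 only),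
-- the padding loop, then the dict literal.  `none` from pyGet? = Python IndexError,
-- there the port returns [] (excluded by Pre_).
def branchA (role_threshold role_idx : Int) (blank_check : Bool)
    (phone_idx inn_idx : Int) (company_name : String) (agent_list : List String) :
    List (String × String) :=
  let role : String :=
    if (agent_list.length : Int) < role_threshold then "Универсал"
    else
      -- role_idx < length here, so pyGet? is `some`; getD's default is unreachable
      let v := (PySem.List.pyGet? agent_list role_idx).getD ""
      if blank_check ∧ v = "" then "Универсал" else v
  let padded : List String :=
    if (agent_list.length : Int) < 5 then
      padWhileA (5 - (agent_list.length : Int)) agent_list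
    else agent_list
  match PySem.List.pyGet? padded 1, PySem.List.pyGet? padded phone_idx,
        PySem.List.pyGet? padded inn_idx with
  | some a1, some ap, some ai =>
      [("agent_name", a1), ("phone_number", ap), ("inn_number", ai),
       ("role", role), ("company_name", company_name)]
  | _, _, _ => []  -- IndexError in A; outside Pre_

def rewriting_data (num_agent : Int) (num_string : Int) (gsheet_value : List (String × List (List String))) : List (String × String) :=
  if num_agent = 1 ∨ num_agent = 4 ∨ num_agent = 5 ∨ num_agent = 6 then
    match (PySem.Dict.ofList gsheet_value).get? "values" with
    | none => []  -- TypeError (None[0]); outside Pre_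
    | some rows =>
      match PySem.List.pyGet? rows 0 with
      | none => []  -- IndexError; outside Pre_
      | some agent_list =>
        let company_name : String :=
          if num_agent = 1 then "Изилоджистик Мск"
          else if num_agent = 4 then "Л Карго СПб"
          else if num_agent = 5 then "Изилоджистик СПб"
          else "Изилоджистик Казань"
        branchA 11 10 false 2 4 company_name agent_list
  else if num_agent = 2 then
    match (PySem.Dict.ofList gsheet_value).get? "values" with
    | none => []
    | some rows =>
      match PySem.List.pyGet? rows 0 with
      | none => []
      | some agent_list => branchA 8 7 true 2 4 "Я го" agent_list
  else if num_agent = 3 then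
    match (PySem.Dict.ofList gsheet_value).get? "values" with
    | none => []
    | some rows =>
      match PySem.List.pyGet? rows 0 with
      | none => []
      | some agent_list => branchA 12 11 false 3 5 "Л Карго Мск" agent_list
  else []  -- UnboundLocalError in A; outside Pre_

-- ===== PORT B =====
def configB (num_agent : Int) : Option (String × Int × Bool × Int × Int) :=
  (PySem.Dict.ofList
    [((1 : Int), ("Изилоджистик Мск", (10 : Int), false, (2 : Int), (4 : Int))),
     (2, ("Я го", 7, true, 2, 4)),
     (3, ("Л Карго Мск", 11, false, 3, 5)),
     (4, ("Л Карго СПб", 10, false, 2, 4)),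
     (5, ("Изилоджистик СПб", 10, false, 2, 4)),
     (6, ("Изилоджистик Казань", 10, false, 2, 4))]).get? num_agent

-- `row[i] if i < len(row) else ''`; pyGet? is `some` whenever i < len(row) and i ≥ 0
-- (all of B's indices are ≥ 0), so getD's default is unreachable
def cellB (row : List String) (i : Int) : String :=
  if i < (row.length : Int) then (PySem.List.pyGet? row i).getD "" else ""

def rewriting_data_alt (num_agent : Int) (num_string : Int) (gsheet_value : List (String × List (List String))) : List (String × String) :=
  match configB num_agent with
  | none => []  -- KeyError in B; outside Pre_
  | some (company, role_idx, blank_means_default, phone_idx, inn_idx) =>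
    match (PySem.Dict.ofList gsheet_value).get? "values" with
    | none => []  -- TypeError; outside Pre_
    | some rows =>
      match PySem.List.pyGet? rows 0 with
      | none => []  -- IndexError; outside Pre_
      | some row =>
        let role0 := cellB row role_idx
        let role :=
          if (row.length : Int) ≤ role_idx ∨ (blank_means_default ∧ role0 = "")
          then "Универсал" else role0
        [("agent_name", cellB row 1), ("phone_number", cellB row phone_idx),
         ("inn_number", cellB row inn_idx), ("role", role), ("company_name", company)]

-- ===== PRECONDITION & SPEC =====
-- Pre_ = exactly the inputs where A returns: num_agent ∈ 1..6, the 'values' key maps to a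
-- nonempty list whose first row has ≥ 2 cells — except num_agent 3, which needs ≥ 3 cells
-- and raises IndexError on exactly 5 cells (agent_list[5] after the under-padding).
def Pre_rewriting_data (num_agent : Int) (num_string : Int) (gsheet_value : List (String × List (List String))) : Prop :=
  (num_agent = 1 ∨ num_agent = 2 ∨ num_agent = 3 ∨ num_agent = 4 ∨ num_agent = 5 ∨ num_agent = 6) ∧
  (((PySem.Dict.ofList gsheet_value).get? "values").bind List.head?).any
    (fun r => decide (if num_agent = 3 then 3 ≤ r.length ∧ r.length ≠ 5 else 2 ≤ r.length)) = true
instance (num_agent : Int) (num_string : Int) (gsheet_value : List (String × List (List String))) : Decidable (Pre_rewriting_data num_agent num_string gsheet_value) := by unfold Pre_rewriting_data; infer_instance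

def pvWitness_rewriting_data : Int × Int × (List (String × List (List String))) :=
  (1, 0, [("values", [["a", "b"]])])

def Spec_rewriting_data (num_agent : Int) (num_string : Int) (gsheet_value : List (String × List (List String))) (out : List (String × String)) : Prop := out = rewriting_data_alt num_agent num_string gsheet_value
instance (num_agent : Int) (num_string : Int) (gsheet_value : List (String × List (List String))) (out : List (String × String)) : Decidable (Spec_rewriting_data num_agent num_string gsheet_value out) := by unfold Spec_rewriting_data; infer_instance

-- ===== CLAIM (what is proved, stated in full; the proofs are below) =====
def Claim_equal_rewriting_data : Prop := ∀ (num_agent : Int) (num_string : Int) (gsheet_value : List (String × List (List String))), Dom_rewriting_data num_agent num_string gsheet_value → Pre_rewriting_data num_agent num_string gsheet_value → Spec_rewriting_data num_agent num_string gsheet_value (rewriting_data num_agent num_string gsheet_value)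
-- ===== LEMMAS AND PROOFS =====

lemma padWhileA_eq (n : Nat) (l : List String) :
    padWhileA (6 - (n : Int)) l = l ++ List.replicate n "" := by
  induction n generalizing l with
  | zero => rw [padWhileA]; simp
  | succ n ih =>
    rw [padWhileA]
    have h1 : (6 - ((n + 1 : Nat) : Int)) ≤ 5 := by push_cast; omega
    have h2 : (6 - ((n + 1 : Nat) : Int)) + 1 = 6 - (n : Int) := by push_cast; ring
    simp only [h1, dif_pos, h2, ih]
    simp [List.replicate_succ]

lemma cellB_natCast (r : List String) (k : Nat) : cellB r (k : Int) = r.getD k "" := by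
  by_cases hk : k < r.length
  · simp [cellB, hk, List.getD, PySem.List.pyGet?_natCast]
  · simp [cellB, hk, List.getD, List.getElem?_eq_none (by omega : r.length ≤ k)]

lemma pad_get (l : List String) (m k : Nat) (h : k < l.length + m) :
    PySem.List.pyGet? (l ++ List.replicate m "") (k : Int) = some (l.getD k "") := by
  rw [PySem.List.pyGet?_natCast]
  by_cases hk : k < l.length
  · rw [List.getElem?_append_left hk]
    simp [List.getD, List.getElem?_eq_getElem hk]
  · rw [List.getElem?_append_right (by omega)]
    simp [List.getD, List.getElem?_eq_none (by omega : l.length ≤ k),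
      List.getElem?_eq_getElem (by simp; omega : k - l.length < (List.replicate m ("":String)).length)]

-- A's branch equals B's assembled dict, given the length bounds Pre_ provides.
lemma branch_eq (role_threshold role_idx : Nat) (blank_check : Bool)
    (phone_idx inn_idx : Nat) (company : String) (l : List String)
    (hrt : role_threshold = role_idx + 1)
    (hp : phone_idx ≤ 3)
    (hlen : 2 ≤ l.length)
    (hinn : inn_idx ≤ 4 ∨ (inn_idx = 5 ∧ 3 ≤ l.length ∧ l.length ≠ 5)) :
    branchA (role_threshold : Int) (role_idx : Int) blank_check (phone_idx : Int) (inn_idx : Int) company l =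
      [("agent_name", cellB l ((1 : Nat) : Int)), ("phone_number", cellB l (phone_idx : Int)),
       ("inn_number", cellB l (inn_idx : Int)), ("role",
         if (l.length : Int) ≤ (role_idx : Int) ∨ (blank_check = true ∧ cellB l (role_idx : Int) = "")
         then "Универсал" else cellB l (role_idx : Int)),
       ("company_name", company)] := by
  have hidx : ∀ k : Nat, k < l.length + (l.length + 1) → (5 ≤ l.length → k < l.length) →
      PySem.List.pyGet?
        (if (l.length : Int) < 5 then padWhileA (5 - (l.length : Int)) l else l) ((k : Nat) : Int)
        = some (l.getD k "") := by
    intro k hk hk5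
    by_cases h5 : (l.length : Int) < 5
    · rw [if_pos h5]
      have : (5 : Int) - (l.length : Int) = 6 - ((l.length + 1 : Nat) : Int) := by push_cast; ring
      rw [this, padWhileA_eq]
      exact pad_get l (l.length + 1) k hk
    · rw [if_neg h5]
      have hkl : k < l.length := hk5 (by omega)
      rw [PySem.List.pyGet?_natCast]
      simp [List.getD, List.getElem?_eq_getElem hkl]
  have e1 := hidx 1 (by omega) (by omega)
  have e2 := hidx phone_idx (by omega) (by omega)
  have e3 := hidx inn_idx (by omega) (by omega)
  rw [Nat.cast_one] at e1
  subst hrt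
  simp only [branchA, e1, e2, e3, cellB_natCast]
  simp only [List.cons.injEq, Prod.mk.injEq, true_and, and_true]
  -- role equality
  by_cases hth : (l.length : Int) < ((role_idx + 1 : Nat) : Int)
  · have hle : (l.length : Int) ≤ (role_idx : Int) := by push_cast at hth ⊢; omega
    simp [hth, hle]
  · have hlt : role_idx < l.length := by push_cast at hth; omega
    have hnle : ¬ (l.length : Int) ≤ (role_idx : Int) := by push_cast at hth ⊢; omega
    have hv : PySem.List.pyGet? l ((role_idx : Nat) : Int) = some (l[role_idx]'hlt) := by
      rw [PySem.List.pyGet?_natCast]; simp [List.getElem?_eq_getElem hlt]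
    have hd : l.getD role_idx "" = l[role_idx]'hlt := by
      simp [List.getD, List.getElem?_eq_getElem hlt]
    simp [hth, hnle, hv, hd, List.getElem?_eq_getElem hlt]

theorem rewriting_data_spec : Claim_equal_rewriting_data := by
  intro num_agent num_string gv _hdom hpre
  unfold Spec_rewriting_data
  obtain ⟨hna, hrow⟩ := hpre
  rcases hv : (PySem.Dict.ofList gv).get? "values" with _ | rows
  · rw [hv] at hrow; simp at hrow
  rcases rows with _ | ⟨r, rest⟩
  · rw [hv] at hrow; simp at hrow
  rw [hv] at hrow
  simp only [Option.bind_some, List.head?_cons, Option.any_some, decide_eq_true_eq] at hrow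
  rcases hna with h | h | h | h | h | h <;> subst h <;> norm_num at hrow
  · have hb := branch_eq 11 10 false 2 4 "Изилоджистик Мск" r rfl (by omega) (by omega) (by omega)
    push_cast at hb
    simp only [rewriting_data, rewriting_data_alt, hv, PySem.List.pyGet?_zero_cons,
      show configB 1 = some ("Изилоджистик Мск", 10, false, 2, 4) from by decide]
    norm_num [hb]
  · have hb := branch_eq 8 7 true 2 4 "Я го" r rfl (by omega) (by omega) (by omega)
    push_cast at hb
    simp only [rewriting_data, rewriting_data_alt, hv, PySem.List.pyGet?_zero_cons,
      show configB 2 = some ("Я го", 7, true, 2, 4) from by decide]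
    norm_num [hb]
  · have hb := branch_eq 12 11 false 3 5 "Л Карго Мск" r rfl (by omega) (by omega) (by omega)
    push_cast at hb
    simp only [rewriting_data, rewriting_data_alt, hv, PySem.List.pyGet?_zero_cons,
      show configB 3 = some ("Л Карго Мск", 11, false, 3, 5) from by decide]
    norm_num [hb]
  · have hb := branch_eq 11 10 false 2 4 "Л Карго СПб" r rfl (by omega) (by omega) (by omega)
    push_cast at hb
    simp only [rewriting_data, rewriting_data_alt, hv, PySem.List.pyGet?_zero_cons,
      show configB 4 = some ("Л Карго СПб", 10, false, 2, 4) from by decide]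
    norm_num [hb]
  · have hb := branch_eq 11 10 false 2 4 "Изилоджистик СПб" r rfl (by omega) (by omega) (by omega)
    push_cast at hb
    simp only [rewriting_data, rewriting_data_alt, hv, PySem.List.pyGet?_zero_cons,
      show configB 5 = some ("Изилоджистик СПб", 10, false, 2, 4) from by decide]
    norm_num [hb]
  · have hb := branch_eq 11 10 false 2 4 "Изилоджистик Казань" r rfl (by omega) (by omega) (by omega)
    push_cast at hb
    simp only [rewriting_data, rewriting_data_alt, hv, PySem.List.pyGet?_zero_cons,
      show configB 6 = some ("Изилоджистик Казань", 10, false, 2, 4) from by decide]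
    norm_num [hb]
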